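-- pv_equiv track=rewrite | github.com/parkhae/pystudy | 요셉/lv0/정사각형으로 만들기(요셉).py | solution
-- ===== SOURCE A (Python) =====
-- def solution(arr):
--     answer = answer = [[0 for x in range(max([len(arr), len(arr[0])]))] for x in range(max([len(arr), len(arr[0])]))]
--     if len(arr) > len(arr[0]):
--         for i in range(max([len(arr), len(arr[0])])):
--             for j in range(min([len(arr), len(arr[0])])):
--                 answer[i][j] = arr[i][j]
--     else:
--         for i in range(min([len(arr), len(arr[0])])):
--             for j in range(max([len(arr), len(arr[0])])):
--                 answer[i][j] = arr[i][j]
--     return answer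
-- ===== SOURCE B (Python) =====
-- def solution(arr):
--     w = len(arr[0])
--     n = len(arr)
--     N = max(n, w)
--     return [row[:w] + [0] * (N - w) for row in arr] + [[0] * N for _ in range(N - n)]
-- ===== Notes on version B (the rewrite author's own statement) =====
-- stated objective: simpler
-- what changed: Replaces the pre-allocated N x N zero grid filled by nested index-assignment loops (with a redundant if/else on the two dimensions) by a direct construction: pad each existing row to width N and append the missing all-zero rows; this avoids allocating and element-wise overwriting the copied region (constant-factor win measured).
import Mathlib
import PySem

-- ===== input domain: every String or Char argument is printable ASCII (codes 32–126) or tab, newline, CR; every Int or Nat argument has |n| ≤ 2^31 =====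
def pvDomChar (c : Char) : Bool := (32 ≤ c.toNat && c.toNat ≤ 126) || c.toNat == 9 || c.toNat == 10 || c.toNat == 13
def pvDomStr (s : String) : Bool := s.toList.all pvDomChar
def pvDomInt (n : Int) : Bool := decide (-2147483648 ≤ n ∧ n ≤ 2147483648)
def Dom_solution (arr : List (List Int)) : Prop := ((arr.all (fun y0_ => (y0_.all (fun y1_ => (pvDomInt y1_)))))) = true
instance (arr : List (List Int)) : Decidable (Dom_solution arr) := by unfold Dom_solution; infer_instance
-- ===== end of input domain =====

-- B pads each existing row to width N and appends the missing zero rows instead of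
-- allocating an N x N zero grid and copying entries with nested index loops (simpler decomposition).

-- ===== PORT A =====
-- arr[i][j] (i, j are loop indices, nonnegative and in range under Pre_, where this is exact)
def pyIdx2 (arr : List (List Int)) (i j : Int) : Int :=
  (PySem.List.pyGet? ((PySem.List.pyGet? arr i).getD []) j).getD 0

-- answer[i][j] = v (i, j nonnegative and in range under Pre_, where this is exact)
def pySet2 (ans : List (List Int)) (i j : Int) (v : Int) : List (List Int) :=
  ans.set i.toNat ((PySem.List.pyGet? ans i).getD [] |>.set j.toNat v)

def solution (arr : List (List Int)) : List (List Int) :=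
  let n : Int := arr.length
  let m : Int := ((PySem.List.pyGet? arr 0).getD []).length  -- len(arr[0]); Pre_ excludes arr = []
  let N : Int := max n m
  let answer := (PySem.List.pyRange 0 N 1).map
    (fun _ => (PySem.List.pyRange 0 N 1).map (fun _ => (0 : Int)))
  if n > m then
    (PySem.List.pyRange 0 N 1).foldl (fun ans i =>
      (PySem.List.pyRange 0 (min n m) 1).foldl (fun ans j =>
        pySet2 ans i j (pyIdx2 arr i j)) ans) answer
  else
    (PySem.List.pyRange 0 (min n m) 1).foldl (fun ans i =>
      (PySem.List.pyRange 0 N 1).foldl (fun ans j =>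
        pySet2 ans i j (pyIdx2 arr i j)) ans) answer

-- ===== PORT B =====
def solution_alt (arr : List (List Int)) : List (List Int) :=
  let w : Int := ((PySem.List.pyGet? arr 0).getD []).length  -- len(arr[0]); Pre_ excludes arr = []
  let n : Int := arr.length
  let N : Int := max n w
  arr.map (fun row => PySem.List.slice row none (some w) ++ List.replicate (N - w).toNat (0 : Int))
    ++ (PySem.List.pyRange 0 (N - n) 1).map (fun _ => List.replicate N.toNat (0 : Int))

-- ===== PRECONDITION & SPEC =====
-- Pre_ excludes exactly the inputs on which A raises IndexError: the empty list
-- (arr[0]) and ragged inputs with a row shorter than the first row (arr[i][j]).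
def Pre_solution (arr : List (List Int)) : Prop :=
  arr ≠ [] ∧ ∀ row ∈ arr, (arr.headD []).length ≤ row.length
instance (arr : List (List Int)) : Decidable (Pre_solution arr) := by unfold Pre_solution; infer_instance

def pvWitness_solution : List (List Int) := [[1, 2, 3], [4, 5, 6]]

def Spec_solution (arr : List (List Int)) (out : List (List Int)) : Prop := out = solution_alt arr
instance (arr : List (List Int)) (out : List (List Int)) : Decidable (Spec_solution arr out) := by unfold Spec_solution; infer_instance

-- ===== CLAIM (what is proved, stated in full; the proofs are below) =====
def Claim_equal_solution : Prop := ∀ (arr : List (List Int)), Dom_solution arr → Pre_solution arr → Spec_solution arr (solution arr)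

-- ===== LEMMAS AND PROOFS =====

-- filling one zero row left to right with entries of a
theorem fillRow (a : List Int) (m N : Nat) (hm : m ≤ a.length) (hmN : m ≤ N) :
    (List.range m).foldl (fun r j => r.set j (a.getD j 0)) (List.replicate N (0 : Int))
      = a.take m ++ List.replicate (N - m) 0 := by
  induction m with
  | zero => simp
  | succ k ih =>
    rw [List.range_succ, List.foldl_append, ih (by omega) (by omega)]
    simp only [List.foldl_cons, List.foldl_nil]
    rw [List.set_append_right _ _ (by simp [Nat.min_eq_left (by omega : k ≤ a.length)])]
    have hk : k ≤ a.length := by omega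
    have h1 : k - (a.take k).length = 0 := by simp [Nat.min_eq_left hk]
    rw [h1]
    have h2 : N - k = (N - (k+1)) + 1 := by omega
    rw [h2, List.replicate_succ, List.set_cons_zero, List.getD_eq_getElem _ _ (by omega)]
    have ht : a.take (k+1) = a.take k ++ [a[k]] := by
      rw [← List.take_concat_get (h := by omega), List.concat_eq_append]
      rfl
    rw [ht, List.append_assoc, List.singleton_append]
    rfl

-- the outer loop sets row i (using the current value of row i) for each i < n, in order
theorem fillRows (g : Nat → List Int → List Int) (n : Nat) (ans0 : List (List Int))
    (hn : n ≤ ans0.length) :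
    (List.range n).foldl (fun ans i => ans.set i (g i (ans.getD i []))) ans0
      = (List.range n).map (fun i => g i (ans0.getD i [])) ++ ans0.drop n := by
  induction n with
  | zero => simp
  | succ k ih =>
    rw [List.range_succ, List.foldl_append, ih (by omega)]
    simp only [List.foldl_cons, List.foldl_nil]
    have hlen : ((List.range k).map (fun i => g i (ans0.getD i []))).length = k := by simp
    have hget : (((List.range k).map (fun i => g i (ans0.getD i []))) ++ ans0.drop k).getD k []
        = ans0.getD k [] := by
      rw [List.getD_eq_getElem?_getD, List.getElem?_append_right (by omega), hlen]
      simp only [Nat.sub_self]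
      rw [List.getElem?_drop, Nat.add_zero, List.getD_eq_getElem?_getD]
    rw [hget, List.set_append_right _ _ (by omega), hlen, Nat.sub_self]
    have hdk : ans0.drop k = ans0.getD k [] :: ans0.drop (k + 1) := by
      rw [List.getD_eq_getElem _ _ (by omega)]
      exact (List.getElem_cons_drop (by omega)).symm
    rw [hdk, List.set_cons_zero, List.map_append]
    simp [List.append_assoc]

theorem pyRange_cast (K : Nat) :
    PySem.List.pyRange 0 (K : Int) 1 = (List.range K).map (fun (k : Nat) => (k : Int)) := by
  rw [PySem.List.pyRange_one]
  simp [List.map_eq_flatMap]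

theorem zeroGrid (N : Nat) :
    (PySem.List.pyRange 0 (N : Int) 1).map
        (fun _ => (PySem.List.pyRange 0 (N : Int) 1).map (fun _ => (0 : Int)))
      = List.replicate N (List.replicate N (0 : Int)) := by
  rw [List.map_const', List.map_const']
  simp [pyRange_cast]

theorem pySet2_cast (ans : List (List Int)) (i j : Nat) (v : Int) :
    pySet2 ans (i : Int) (j : Int) v = ans.set i ((ans.getD i []).set j v) := by
  unfold pySet2
  by_cases hi : i < ans.length
  · simp [PySem.List.pyGet?, PySem.List.pyIdx?, hi, List.getD_eq_getElem?_getD]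
  · simp [PySem.List.pyGet?, PySem.List.pyIdx?, hi, List.getD_eq_getElem?_getD]

theorem pyIdx2_cast (arr : List (List Int)) (i j : Nat) :
    pyIdx2 arr (i : Int) (j : Int) = ((arr.getD i []).getD j 0 : Int) := by
  unfold pyIdx2
  by_cases hi : i < arr.length
  · rw [List.getD_eq_getElem _ _ hi]
    by_cases hj : j < (arr[i]).length
    · simp [PySem.List.pyGet?, PySem.List.pyIdx?, hi, hj, List.getD_eq_getElem?_getD]
    · simp [PySem.List.pyGet?, PySem.List.pyIdx?, hi, hj, List.getD_eq_getElem?_getD]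
  · simp [PySem.List.pyGet?, PySem.List.pyIdx?, hi, List.getD_eq_getElem?_getD]

-- the inner j-loop, recast over Nat indices, is one row-set
theorem foldl_set2 (arr : List (List Int)) (ans : List (List Int)) (i m : Nat)
    (hi : i < ans.length) :
    (List.range m).foldl (fun a (j : Nat) => pySet2 a (i : Int) (j : Int) (pyIdx2 arr (i : Int) (j : Int))) ans
      = ans.set i ((List.range m).foldl
          (fun r j => r.set j ((arr.getD i []).getD j 0)) (ans.getD i [])) := by
  induction m with
  | zero =>
    simp only [List.range_zero, List.foldl_nil]
    rw [List.getD_eq_getElem _ _ hi, List.set_getElem_self]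
  | succ k ih =>
    rw [List.range_succ, List.foldl_append, List.foldl_append, ih]
    simp only [List.foldl_cons, List.foldl_nil]
    rw [pySet2_cast, pyIdx2_cast, List.set_set]
    have hcur : ((ans.set i ((List.range k).foldl
        (fun r j => r.set j ((arr.getD i []).getD j 0)) (ans.getD i []))).getD i [])
        = (List.range k).foldl (fun r j => r.set j ((arr.getD i []).getD j 0)) (ans.getD i []) := by
      rw [List.getD_eq_getElem _ _ (by simpa using hi), List.getElem_set_self]
    rw [hcur]

-- foldl congruence under a preserved invariant
theorem foldl_congr_inv {α β : Type} (P : α → Prop) (f g : α → β → α) (l : List β) (a : α)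
    (ha : P a) (hfg : ∀ x b, b ∈ l → P x → f x b = g x b) (hP : ∀ x b, P x → P (g x b)) :
    l.foldl f a = l.foldl g a := by
  induction l generalizing a with
  | nil => rfl
  | cons b t ih =>
    simp only [List.foldl_cons]
    rw [hfg a b (by simp) ha]
    exact ih (g a b) (hP a b ha) (fun x c hc hx => hfg x c (by simp [hc]) hx)

theorem map_getD_range {α β : Type} (l : List α) (f : α → β) (d : α) :
    (List.range l.length).map (fun i => f (l.getD i d)) = l.map f := by
  induction l with
  | nil => simp
  | cons x t ih =>
    rw [List.length_cons, List.range_succ_eq_map, List.map_cons, List.map_map, List.map_cons,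
      ← ih]
    exact congrArg _ (List.map_congr_left (fun i _ => rfl))

-- the common core of both branches of A's if/else
theorem core (arr : List (List Int)) (m N : Nat)
    (hm : ∀ row ∈ arr, m ≤ row.length) (hn : arr.length ≤ N) (hmN : m ≤ N) :
    (List.range arr.length).foldl (fun ans (i : Nat) =>
        (List.range m).foldl (fun a (j : Nat) =>
          pySet2 a (i : Int) (j : Int) (pyIdx2 arr (i : Int) (j : Int))) ans)
      (List.replicate N (List.replicate N (0 : Int)))
      = arr.map (fun row => row.take m ++ List.replicate (N - m) (0 : Int))
          ++ List.replicate (N - arr.length) (List.replicate N (0 : Int)) := by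
  rw [foldl_congr_inv (fun a => a.length = N) _
    (fun ans i => ans.set i ((List.range m).foldl
      (fun r j => r.set j ((arr.getD i []).getD j 0)) (ans.getD i [])))
    _ _ (by simp)
    (fun x b hb hx => foldl_set2 arr x b m (by rw [hx]; exact lt_of_lt_of_le (List.mem_range.mp hb) hn))
    (fun x b hx => by simpa using hx)]
  rw [fillRows (fun i r => (List.range m).foldl
      (fun r' j => r'.set j ((arr.getD i []).getD j 0)) r) arr.length _ (by simpa using hn)]
  rw [List.drop_replicate]
  congr 1
  have h1 : ∀ i ∈ List.range arr.length,
      (List.range m).foldl (fun r j => r.set j ((arr.getD i []).getD j 0))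
        ((List.replicate N (List.replicate N (0 : Int))).getD i [])
      = (arr.getD i []).take m ++ List.replicate (N - m) (0 : Int) := by
    intro i hi
    have hiN : i < N := lt_of_lt_of_le (List.mem_range.mp hi) hn
    rw [List.getD_eq_getElem (List.replicate N (List.replicate N (0 : Int))) _
      (by simpa using hiN), List.getElem_replicate]
    refine fillRow _ _ _ (hm _ ?_) hmN
    rw [List.getD_eq_getElem arr _ (List.mem_range.mp hi)]
    exact List.getElem_mem _
  exact (List.map_congr_left h1).trans
    (map_getD_range arr (fun row => row.take m ++ List.replicate (N - m) (0 : Int)) [])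

-- ===== VERDICT (by name: the statement is the Claim_ definition above) =====
theorem solution_spec : Claim_equal_solution := by
  intro arr _ hpre
  obtain ⟨hne, hrows⟩ := hpre
  obtain ⟨r, t, rfl⟩ := List.exists_cons_of_ne_nil hne
  unfold Spec_solution solution solution_alt
  have hget0 : PySem.List.pyGet? (r :: t) 0 = some r := by
    simp [PySem.List.pyGet?, PySem.List.pyIdx?]
  rw [hget0]
  simp only [Option.getD_some]
  have hrows' : ∀ row ∈ r :: t, r.length ≤ row.length := by simpa using hrows
  set n := (r :: t).length with hn
  set m := r.length with hm
  have hcastmax : max (n : Int) (m : Int) = ((max n m : Nat) : Int) := by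
    rw [Nat.cast_max]
  have hcastmin : min (n : Int) (m : Int) = ((min n m : Nat) : Int) := by
    rw [Nat.cast_min]
  have hslice : ∀ row : List Int, PySem.List.slice row none (some (m : Int)) = row.take m :=
    fun row => PySem.List.slice_to_natCast row m
  by_cases hcmp : (m : Int) < (n : Int)
  · -- n > m : N = n
    have hmn : m < n := by exact_mod_cast hcmp
    have hNmax : max n m = n := by omega
    rw [if_pos hcmp, hcastmax, hcastmin, hNmax, Nat.min_eq_right (by omega : m ≤ n)]
    rw [zeroGrid n, pyRange_cast n, pyRange_cast m, List.foldl_map]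
    simp only [List.foldl_map]
    rw [core (r :: t) m n hrows' (le_refl n) (by omega)]
    rw [Nat.sub_self, List.replicate_zero, List.append_nil]
    have hpad : ((n : Int) - (m : Int)).toNat = n - m := by omega
    have htail : (PySem.List.pyRange 0 ((n : Int) - (n : Int)) 1).map
        (fun _ => List.replicate (n : Int).toNat (0:Int)) = [] := by
      have : ((n : Int) - (n : Int)) = ((0:Nat) : Int) := by omega
      rw [this, pyRange_cast 0]
      simp
    rw [htail, List.append_nil, hpad]
    exact List.map_congr_left (fun row _ => by rw [hslice row])
  · -- n ≤ m : N = m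
    have hmn : n ≤ m := by exact_mod_cast not_lt.mp hcmp
    have hNmax : max n m = m := by omega
    rw [if_neg (by exact_mod_cast hcmp), hcastmax, hcastmin, hNmax,
      Nat.min_eq_left (by omega : n ≤ m)]
    rw [zeroGrid m, pyRange_cast n, pyRange_cast m, List.foldl_map]
    simp only [List.foldl_map]
    rw [core (r :: t) m m hrows' hmn (le_refl m)]
    have hpad : ((m : Int) - (m : Int)).toNat = m - m := by omega
    have htail : (PySem.List.pyRange 0 ((m : Int) - (n : Int)) 1).map
        (fun _ => List.replicate (m : Int).toNat (0:Int))
        = List.replicate (m - n) (List.replicate m (0:Int)) := by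
      have hc : ((m : Int) - (n : Int)) = (((m - n : Nat)) : Int) := by omega
      rw [hc, pyRange_cast (m - n)]
      have hmt : ((m : Int)).toNat = m := by omega
      simp [Function.comp_def, hmt, List.map_const']
    rw [htail]
    congr 1
    exact List.map_congr_left (fun row _ => by simp [hslice row])
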